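-- pv_equiv track=rewrite | github.com/harsh-kunming/CostDashBoard-Chat | src/app.py | sort_months
-- ===== SOURCE A (Python) =====
-- def sort_months(months):
--     """
--     Sort months supporting both full names and abbreviations.
--
--     Args:
--         months: List of month names (full names or abbreviations)
--
--     Returns:
--         List of months sorted in chronological order
--     """
--     import calendar
--
--     # Create mapping for both full names and abbreviations
--     month_mapping = {}
--
--     for i in range(1, 13):
--         full_name = calendar.month_name[i]
--         abbr_name = calendar.month_abbr[i]
--         month_mapping[full_name] = i
--         month_mapping[abbr_name] = i
--         month_mapping[full_name.lower()] = i
--         month_mapping[abbr_name.lower()] = i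
--
--     # Sort based on month order
--     sorted_months = sorted(months, key=lambda month: month_mapping.get(month, 13))
--
--     return sorted_months
-- ===== SOURCE B (Python) =====
-- def sort_months(months):
--     """
--     Sort months supporting both full names and abbreviations.
--
--     Bucket sort: one pass distributes each entry into one of 13 buckets
--     (months 1-12, unknown strings last), then the buckets are concatenated.
--     Stable, like sorted().
--     """
--     import calendar
--
--     key = {}
--     for i in range(1, 13):
--         for name in (calendar.month_name[i], calendar.month_abbr[i],
--                      calendar.month_name[i].lower(), calendar.month_abbr[i].lower()):
--             key[name] = i
--
--     buckets = [[] for _ in range(13)]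
--     for month in months:
--         buckets[key.get(month, 13) - 1].append(month)
--
--     out = []
--     for b in buckets:
--         out += b
--     return out
-- ===== Notes on version B (the rewrite author's own statement) =====
-- stated objective: alternative
-- what changed: Replaces the comparison sort keyed by month number with a single-pass stable bucket sort into 13 buckets (months 1..12 plus a final bucket for unrecognised strings) that are then concatenated.
import Mathlib
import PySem

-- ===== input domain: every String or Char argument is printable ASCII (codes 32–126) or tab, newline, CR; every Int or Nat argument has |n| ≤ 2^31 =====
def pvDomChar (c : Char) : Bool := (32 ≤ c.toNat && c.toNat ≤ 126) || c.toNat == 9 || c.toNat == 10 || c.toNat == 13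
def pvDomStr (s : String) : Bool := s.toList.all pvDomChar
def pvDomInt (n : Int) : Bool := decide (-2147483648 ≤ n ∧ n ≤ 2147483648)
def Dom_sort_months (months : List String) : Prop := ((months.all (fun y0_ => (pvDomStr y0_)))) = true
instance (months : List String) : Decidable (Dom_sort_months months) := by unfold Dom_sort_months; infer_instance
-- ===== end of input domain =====

-- B replaces A's comparison sort with a stable single-pass bucket sort over 13 month keys (objective: alternative algorithm).

-- ===== PORT A =====
-- calendar.month_name / calendar.month_abbr (index 0 is the empty string, as in Python)
def pvMonthNames : List String :=
  ["", "January", "February", "March", "April", "May", "June", "July",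
   "August", "September", "October", "November", "December"]
def pvMonthAbbrs : List String :=
  ["", "Jan", "Feb", "Mar", "Apr", "May", "Jun", "Jul", "Aug", "Sep", "Oct", "Nov", "Dec"]

-- month_mapping built by A's loop (index i ∈ 1..12 is always in range, so pyGetD's default is never used)
def pvMapA : PySem.Dict String Int :=
  (PySem.List.pyRange 1 13).foldl (fun d i =>
    let full := PySem.List.pyGetD pvMonthNames i ""
    let abbr := PySem.List.pyGetD pvMonthAbbrs i ""
    ((((d.insert full i).insert abbr i).insert (PySem.Str.lower full) i).insert
      (PySem.Str.lower abbr) i))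
    PySem.Dict.empty

-- lambda month: month_mapping.get(month, 13)
def pvKeyA (month : String) : Int := pvMapA.getD month 13

def sort_months (months : List String) : List String :=
  PySem.List.sorted months pvKeyA false

-- ===== PORT B =====
-- the same mapping, built by B's nested loop
def pvMapB : PySem.Dict String Int :=
  (PySem.List.pyRange 1 13).foldl (fun d i =>
    [PySem.List.pyGetD pvMonthNames i "", PySem.List.pyGetD pvMonthAbbrs i "",
     PySem.Str.lower (PySem.List.pyGetD pvMonthNames i ""),
     PySem.Str.lower (PySem.List.pyGetD pvMonthAbbrs i "")].foldl
      (fun d name => d.insert name i) d)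
    PySem.Dict.empty

def pvKeyB (month : String) : Int := pvMapB.getD month 13

def sort_months_alt (months : List String) : List String :=
  -- buckets[key.get(month,13)-1].append(month); the index is provably in 0..12
  let buckets := months.foldl (fun bs month =>
      let j := (pvKeyB month - 1).toNat
      bs.set j (bs.getD j [] ++ [month]))
    (List.replicate 13 [])
  buckets.foldl (fun out b => out ++ b) []

-- ===== PRECONDITION & SPEC =====
def Spec_sort_months (months : List String) (out : List String) : Prop := out = sort_months_alt months
instance (months : List String) (out : List String) : Decidable (Spec_sort_months months out) := by unfold Spec_sort_months; infer_instance

-- ===== CLAIM (what is proved, stated in full; the proofs are below) =====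
def Claim_equal_sort_months : Prop := ∀ (months : List String), Dom_sort_months months → Spec_sort_months months (sort_months months)

-- ===== LEMMAS AND PROOFS =====

set_option maxRecDepth 10000 in
lemma pvMap_eq : pvMapA = pvMapB := by decide

lemma pvKey_eq : pvKeyB = pvKeyA := by
  funext m; simp [pvKeyA, pvKeyB, pvMap_eq]

set_option maxRecDepth 10000 in
lemma pvMapA_values_bounds : ∀ v ∈ pvMapA.values, 1 ≤ v ∧ v ≤ 12 := by decide

lemma pvKey_bounds (m : String) : 1 ≤ pvKeyA m ∧ pvKeyA m ≤ 13 := by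
  have hvals : ∀ v ∈ pvMapA.values, 1 ≤ v ∧ v ≤ 12 := pvMapA_values_bounds
  unfold pvKeyA
  rw [PySem.Dict.getD_eq_get?_getD]
  cases h : pvMapA.get? m with
  | none => simp
  | some v =>
    have hv := hvals v (by
      have := PySem.Dict.mem_items_of_get?_eq_some (d := pvMapA) h
      simp only [PySem.Dict.values]
      exact List.mem_map.mpr ⟨(m, v), this, rfl⟩)
    simpa using ⟨le_trans hv.1 (le_refl v), le_trans hv.2 (by norm_num)⟩

-- out += b over the buckets is flatten
lemma foldl_app {α : Type} (ls : List (List α)) (acc : List α) :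
    ls.foldl (fun out b => out ++ b) acc = acc ++ ls.flatten := by
  induction ls generalizing acc with
  | nil => simp
  | cons l t ih => simp [List.foldl_cons, ih, List.append_assoc]

lemma insertBy_last {α : Type} (before : α → α → Bool) (x : α) (L : List α)
    (hL : ∀ y ∈ L, before x y = false) :
    PySem.List.insertBy before x L = L ++ [x] := by
  induction L with
  | nil => rfl
  | cons y t ih =>
    simp only [PySem.List.insertBy, hL y (by simp)]
    simp [ih (fun z hz => hL z (by simp [hz]))]

lemma insertBy_append_right {α : Type} (before : α → α → Bool) (x : α) (L B : List α)
    (hB : ∀ y ∈ B, before x y = true) :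
    PySem.List.insertBy before x (L ++ B) = PySem.List.insertBy before x L ++ B := by
  induction L with
  | nil =>
    cases B with
    | nil => rfl
    | cons b t => simp [PySem.List.insertBy, hB b (by simp)]
  | cons y t ih =>
    by_cases h : before x y = true
    · simp [PySem.List.insertBy, h]
    · simp only [List.cons_append, PySem.List.insertBy, eq_false_of_ne_true h]
      simp [ih]

-- the concatenation of the first n buckets (keys 1..n)
def Jbuck {α : Type} (key : α → Int) (xs : List α) (n : Nat) : List α :=
  ((List.range n).map (fun (j : Nat) => xs.filter (fun a => key a = (j : Int) + 1))).flatten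

lemma mem_Jbuck_key {α : Type} {key : α → Int} {xs : List α} {n : Nat} {y : α}
    (h : y ∈ Jbuck key xs n) : ∃ j : Nat, j < n ∧ key y = (j : Int) + 1 := by
  unfold Jbuck at h
  rw [List.mem_flatten] at h
  obtain ⟨l, hl, hy⟩ := h
  rw [List.mem_map] at hl
  obtain ⟨j, hj, rfl⟩ := hl
  exact ⟨j, List.mem_range.mp hj, by simpa using (List.mem_filter.mp hy).2⟩

lemma Jbuck_append_of_gt {α : Type} {key : α → Int} (xs : List α) (x : α) (n : Nat)
    (hx : ¬ key x ≤ (n : Int)) : Jbuck key (xs ++ [x]) n = Jbuck key xs n := by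
  unfold Jbuck
  congr 1
  refine List.map_congr_left (fun j hj => ?_)
  have hj' := List.mem_range.mp hj
  rw [List.filter_append]
  have : key x ≠ (j : Int) + 1 := by
    intro h; apply hx; rw [h]; exact_mod_cast Nat.succ_le_of_lt hj'
  simp [this]

lemma insertBy_Jbuck {α : Type} (key : α → Int) (x : α) (xs : List α) (n : Nat)
    (h1 : 1 ≤ key x) (h2 : key x ≤ (n : Int)) :
    PySem.List.insertBy (fun a b => decide (key a < key b)) x (Jbuck key xs n)
      = Jbuck key (xs ++ [x]) n := by
  induction n with
  | zero => exact absurd (le_trans h1 h2) (by norm_num)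
  | succ n ih =>
    have hsplit : ∀ ys : List α, Jbuck key ys (n + 1)
        = Jbuck key ys n ++ ys.filter (fun a => key a = (n : Int) + 1) := by
      intro ys
      simp [Jbuck, List.range_succ]
    by_cases htop : key x = (n : Int) + 1
    · rw [hsplit xs, insertBy_last]
      · rw [hsplit (xs ++ [x]), Jbuck_append_of_gt xs x n (by omega)]
        simp [List.filter_append, htop]
      · intro y hy
        rcases List.mem_append.mp hy with hy | hy
        · obtain ⟨j, hj, hkey⟩ := mem_Jbuck_key hy
          simp only [decide_eq_false_iff_not, not_lt, htop, hkey]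
          omega
        · have := (List.mem_filter.mp hy).2
          simp only [decide_eq_true_eq] at this
          simp only [decide_eq_false_iff_not, not_lt, htop, this]
          omega
    · have h2' : key x ≤ (n : Int) := by
        have : (n : Int) + 1 = ((n + 1 : Nat) : Int) := by push_cast; ring
        omega
      rw [hsplit xs, insertBy_append_right, ih h2', hsplit (xs ++ [x])]
      · congr 1
        simp [List.filter_append, htop]
      · intro y hy
        have := (List.mem_filter.mp hy).2
        simp only [decide_eq_true_eq] at this
        simp only [decide_eq_true_eq, this]
        omega

lemma sorted_eq_Jbuck {α : Type} (key : α → Int) (xs : List α)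
    (h : ∀ x, 1 ≤ key x ∧ key x ≤ 13) :
    PySem.List.sorted xs key false = Jbuck key xs 13 := by
  rw [PySem.List.sorted_eq_foldl_insertBy]
  induction xs using List.reverseRecOn with
  | nil => simp [Jbuck]
  | append_singleton xs x ih =>
    rw [List.foldl_append, List.foldl_cons, List.foldl_nil, ih,
      insertBy_Jbuck key x xs 13 (h x).1 (by exact_mod_cast (h x).2)]

-- B's bucket loop, characterised
lemma bucket_foldl (xs : List String) (bs0 : List (List String)) (h : bs0.length = 13) :
    xs.foldl (fun bs month =>
        let j := (pvKeyB month - 1).toNat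
        bs.set j (bs.getD j [] ++ [month])) bs0
      = (List.range 13).map (fun j => bs0.getD j [] ++
          xs.filter (fun m => (pvKeyB m - 1).toNat = j)) := by
  induction xs generalizing bs0 with
  | nil =>
    simp only [List.foldl_nil, List.filter_nil, List.append_nil]
    apply List.ext_getElem
    · simp [h]
    · intro i h1 h2
      simp at h2
      simp [List.getElem_map, List.getD_eq_getElem?_getD, List.getElem?_eq_getElem (by omega : i < bs0.length)]
  | cons m t ih =>
    have hlt : (pvKeyB m - 1).toNat < 13 := by
      have := pvKey_bounds m
      rw [← pvKey_eq] at this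
      omega
    rw [List.foldl_cons, ih _ (by simp [h])]
    refine List.map_congr_left (fun j hj => ?_)
    have hj' := List.mem_range.mp hj
    show (bs0.set ((pvKeyB m - 1).toNat) (bs0.getD ((pvKeyB m - 1).toNat) [] ++ [m])).getD j [] ++
        List.filter (fun m' => decide ((pvKeyB m' - 1).toNat = j)) t
      = bs0.getD j [] ++ List.filter (fun m' => decide ((pvKeyB m' - 1).toNat = j)) (m :: t)
    by_cases hc : (pvKeyB m - 1).toNat = j
    · subst hc
      rw [List.filter_cons_of_pos (by simp)]
      rw [List.getD_eq_getElem?_getD, List.getElem?_set_self (by omega), Option.getD_some,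
        List.getD_eq_getElem?_getD, List.getElem?_eq_getElem (by omega), Option.getD_some,
        List.append_assoc, List.singleton_append]
    · rw [List.filter_cons_of_neg (by simpa using hc)]
      rw [List.getD_eq_getElem?_getD, List.getElem?_set_ne hc, ← List.getD_eq_getElem?_getD]

lemma alt_eq_Jbuck (months : List String) :
    sort_months_alt months = Jbuck pvKeyA months 13 := by
  unfold sort_months_alt
  rw [bucket_foldl months _ (by simp), foldl_app, List.nil_append]
  unfold Jbuck
  refine congrArg List.flatten ?_
  refine List.map_congr_left (fun j hj => ?_)
  rw [List.getD_eq_getElem?_getD, List.getElem?_replicate_of_lt (List.mem_range.mp hj)]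
  simp only [Option.getD_some, List.nil_append]
  refine List.filter_congr (fun m _ => ?_)
  have hb := pvKey_bounds m
  rw [pvKey_eq]
  simp only [decide_eq_decide]
  omega

-- ===== VERDICT (by name: the statement is the Claim_ definition above) =====
theorem sort_months_spec : Claim_equal_sort_months := by
  intro months _
  unfold Spec_sort_months sort_months
  rw [alt_eq_Jbuck, sorted_eq_Jbuck pvKeyA months pvKey_bounds]
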